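-- pv_equiv track=rewrite | github.com/yganalyst/daily-algorithm | programmers/완전탐색_모의고사.py | solution
-- ===== SOURCE A (Python) =====
-- def solution(answers):
--     cnt_1 = 0
--     ans_1 = [1,2,3,4,5]
--     cnt_2 = 0
--     ans_2 = [2,1,2,3,2,4,2,5]
--     cnt_3 = 0
--     ans_3 = [3,3,1,1,2,2,4,4,5,5]
--     for i in range(len(answers)):
--         cnt_1 += answers[i] == ans_1[i%5]
--         cnt_2 += answers[i] == ans_2[i%8]
--         cnt_3 += answers[i] == ans_3[i%10]
--
--     ls_ = [(1,cnt_1),(2,cnt_2),(3,cnt_3)]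
--     max_cnt = max(cnt_1,cnt_2,cnt_3)
--     answer = [k for k,v in ls_ if v == max_cnt]
--     return answer
-- ===== SOURCE B (Python) =====
-- def solution(answers):
--     # Index answers once by (position mod 40, value); 40 = lcm(5, 8, 10), the
--     # common period of the three patterns.  Each pattern's score is then read
--     # off the 40 residue buckets without rescanning the answers.
--     hist = {}
--     for i, a in enumerate(answers):
--         key = (i % 40, a)
--         hist[key] = hist.get(key, 0) + 1
--     patterns = [[1, 2, 3, 4, 5],
--                 [2, 1, 2, 3, 2, 4, 2, 5],
--                 [3, 3, 1, 1, 2, 2, 4, 4, 5, 5]]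
--     scores = [sum(hist.get((r, p[r % len(p)]), 0) for r in range(40))
--               for p in patterns]
--     best = max(scores)
--     return [k for k in (1, 2, 3) if scores[k - 1] == best]
-- ===== Notes on version B (the rewrite author's own statement) =====
-- stated objective: alternative
-- what changed: A scans the answers once updating three fused per-pattern counters; B first builds a frequency index (dict) of answers keyed by (position mod 40, value) -- 40 = lcm of the pattern lengths -- and then computes each pattern's score purely from the 40 residue buckets of that index, never rescanning the answers.
import Mathlib
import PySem

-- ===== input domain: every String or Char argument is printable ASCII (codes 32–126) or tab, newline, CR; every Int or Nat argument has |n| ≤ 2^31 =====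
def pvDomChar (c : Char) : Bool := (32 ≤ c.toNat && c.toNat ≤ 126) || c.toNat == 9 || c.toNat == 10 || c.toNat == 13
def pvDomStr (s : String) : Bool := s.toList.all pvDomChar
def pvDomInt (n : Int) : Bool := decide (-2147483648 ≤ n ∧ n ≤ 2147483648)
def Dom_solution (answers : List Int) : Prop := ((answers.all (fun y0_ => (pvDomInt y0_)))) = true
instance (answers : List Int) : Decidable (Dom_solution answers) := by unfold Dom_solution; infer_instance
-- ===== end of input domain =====

-- B replaces A's fused three-counter scan by a (position mod 40, value) frequency index built once
-- and per-pattern scores read off its 40 residue buckets; objective: alternative algorithm.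

-- ===== PORT A =====
-- one fused loop over range(len(answers)) updating the three counters together
def solution (answers : List Int) : List Int :=
  let ans1 : List Int := [1, 2, 3, 4, 5]
  let ans2 : List Int := [2, 1, 2, 3, 2, 4, 2, 5]
  let ans3 : List Int := [3, 3, 1, 1, 2, 2, 4, 4, 5, 5]
  let c :=
    (PySem.List.pyRange 0 (answers.length : Int) 1).foldl
      (fun (c : Int × Int × Int) i =>
        (c.1 + (if PySem.List.pyGetD answers i 0 = PySem.List.pyGetD ans1 (PySem.Int.mod i 5) 0 then 1 else 0),
         c.2.1 + (if PySem.List.pyGetD answers i 0 = PySem.List.pyGetD ans2 (PySem.Int.mod i 8) 0 then 1 else 0),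
         c.2.2 + (if PySem.List.pyGetD answers i 0 = PySem.List.pyGetD ans3 (PySem.Int.mod i 10) 0 then 1 else 0)))
      (0, 0, 0)
  let maxCnt := max c.1 (max c.2.1 c.2.2)
  ([(1, c.1), (2, c.2.1), (3, c.2.2)] : List (Int × Int)).filterMap
    (fun kv => if kv.2 = maxCnt then some kv.1 else none)

-- ===== PORT B =====
-- hist[(i % 40, a)] += 1 over enumerate(answers)
def histIndex (answers : List Int) : PySem.Dict (Int × Int) Int :=
  (PySem.List.enumerate answers 0).foldl
    (fun d ia => d.modify (PySem.Int.mod ia.1 40, ia.2) 0 (· + 1)) PySem.Dict.empty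

-- sum(hist.get((r, p[r % len(p)]), 0) for r in range(40))
def bucketScore (hist : PySem.Dict (Int × Int) Int) (p : List Int) : Int :=
  ((PySem.List.pyRange 0 40 1).map
    (fun r => hist.getD (r, PySem.List.pyGetD p (PySem.Int.mod r (p.length : Int)) 0) 0)).sum

def solution_alt (answers : List Int) : List Int :=
  let hist := histIndex answers
  let patterns : List (List Int) :=
    [[1, 2, 3, 4, 5], [2, 1, 2, 3, 2, 4, 2, 5], [3, 3, 1, 1, 2, 2, 4, 4, 5, 5]]
  let scores := patterns.map (fun p => bucketScore hist p)
  let best := (PySem.List.max? scores id).getD 0   -- scores always has 3 elements, so max() never raises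
  ([1, 2, 3] : List Int).filterMap
    (fun k => if PySem.List.pyGetD scores (k - 1) 0 = best then some k else none)

-- ===== PRECONDITION & SPEC =====
def Spec_solution (answers : List Int) (out : List Int) : Prop := out = solution_alt answers
instance (answers : List Int) (out : List Int) : Decidable (Spec_solution answers out) := by unfold Spec_solution; infer_instance

-- ===== CLAIM (what is proved, stated in full; the proofs are below) =====
def Claim_equal_solution : Prop := ∀ (answers : List Int), Dom_solution answers → Spec_solution answers (solution answers)

-- ===== LEMMAS AND PROOFS =====

-- the per-index match count for one pattern (common reference value for both proofs)
def refScore (p : List Int) (answers : List Int) : Int :=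
  ((PySem.List.enumerate answers 0).map
    (fun ia => if ia.2 = PySem.List.pyGetD p (PySem.Int.mod ia.1 (p.length : Int)) 0 then (1 : Int) else 0)).sum

-- A's fused triple fold computes the three per-pattern reference scores
theorem triple_eq (answers : List Int) :
    ((PySem.List.pyRange 0 (answers.length : Int) 1).foldl
      (fun (c : Int × Int × Int) i =>
        (c.1 + (if PySem.List.pyGetD answers i 0 = PySem.List.pyGetD [1, 2, 3, 4, 5] (PySem.Int.mod i 5) 0 then 1 else 0),
         c.2.1 + (if PySem.List.pyGetD answers i 0 = PySem.List.pyGetD [2, 1, 2, 3, 2, 4, 2, 5] (PySem.Int.mod i 8) 0 then 1 else 0),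
         c.2.2 + (if PySem.List.pyGetD answers i 0 = PySem.List.pyGetD [3, 3, 1, 1, 2, 2, 4, 4, 5, 5] (PySem.Int.mod i 10) 0 then 1 else 0)))
      (0, 0, 0))
    = (refScore [1, 2, 3, 4, 5] answers,
       refScore [2, 1, 2, 3, 2, 4, 2, 5] answers,
       refScore [3, 3, 1, 1, 2, 2, 4, 4, 5, 5] answers) := by
  rw [PySem.List.foldl_prod_mk
        (fun c i => c + (if PySem.List.pyGetD answers i 0 = PySem.List.pyGetD [1, 2, 3, 4, 5] (PySem.Int.mod i 5) 0 then 1 else 0))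
        (fun (c : Int × Int) i =>
          (c.1 + (if PySem.List.pyGetD answers i 0 = PySem.List.pyGetD [2, 1, 2, 3, 2, 4, 2, 5] (PySem.Int.mod i 8) 0 then 1 else 0),
           c.2 + (if PySem.List.pyGetD answers i 0 = PySem.List.pyGetD [3, 3, 1, 1, 2, 2, 4, 4, 5, 5] (PySem.Int.mod i 10) 0 then 1 else 0)))]
  rw [PySem.List.foldl_prod_mk
        (fun c i => c + (if PySem.List.pyGetD answers i 0 = PySem.List.pyGetD [2, 1, 2, 3, 2, 4, 2, 5] (PySem.Int.mod i 8) 0 then 1 else 0))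
        (fun c i => c + (if PySem.List.pyGetD answers i 0 = PySem.List.pyGetD [3, 3, 1, 1, 2, 2, 4, 4, 5, 5] (PySem.Int.mod i 10) 0 then 1 else 0))]
  rw [PySem.List.foldl_add, PySem.List.foldl_add, PySem.List.foldl_add]
  simp only [refScore, PySem.List.enumerate_eq_map_pyRange _ (0 : Int), List.map_map, PySem.List.len_eq]
  norm_num
  refine ⟨rfl, rfl, rfl⟩

-- the 0/1 indicator summed over all 40 residues picks out the single residue k.1
theorem range_ite_sum (pv : Int → Int) (k : Int × Int) (h0 : 0 ≤ k.1) (h40 : k.1 < 40) :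
    ((PySem.List.pyRange 0 40 1).map (fun r => if (r, pv r) = k then (1 : Int) else 0)).sum
    = if k.2 = pv k.1 then 1 else 0 := by
  by_cases hk : k.2 = pv k.1
  · have heq : ∀ r : Int, ((r, pv r) = k) ↔ (r = k.1) := by
      intro r
      constructor
      · intro h; exact congrArg Prod.fst h
      · rintro rfl; exact (Prod.ext rfl hk.symm)
    simp only [heq, hk]
    have := PySem.List.sum_map_ite_one_zero (fun r => decide (r = k.1)) (PySem.List.pyRange 0 40 1)
    simp only [decide_eq_true_eq] at this
    rw [this]
    have hcnt : List.countP (fun r => decide (r = k.1)) (PySem.List.pyRange 0 40 1) = 1 := by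
      have hc : List.countP (fun r => decide (r = k.1)) (PySem.List.pyRange 0 40 1)
          = List.count k.1 (PySem.List.pyRange 0 40 1) := by
        rw [List.count_eq_countP]
        apply List.countP_congr
        intro x _
        simp
      rw [hc]
      exact List.count_eq_one_of_mem (PySem.List.nodup_pyRange_one 0 40)
        (PySem.List.mem_pyRange_one.mpr ⟨h0, h40⟩)
    rw [hcnt]; rfl
  · have heq : ∀ r : Int, ¬ ((r, pv r) = k) := by
      intro r h
      apply hk
      have h1 : r = k.1 := congrArg Prod.fst h
      have h2 : pv r = k.2 := congrArg Prod.snd h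
      rw [← h2, h1]
    simp [heq, hk]

-- summing the bucket counts over the 40 residues = summing the per-element match indicators
theorem count_sum_eq (pv : Int → Int) (ks : List (Int × Int)) (h : ∀ k ∈ ks, 0 ≤ k.1 ∧ k.1 < 40) :
    ((PySem.List.pyRange 0 40 1).map (fun r => ((ks.count (r, pv r) : Int)))).sum
    = (ks.map (fun k => if k.2 = pv k.1 then (1 : Int) else 0)).sum := by
  induction ks with
  | nil => simp
  | cons k ks ih =>
    have hk := h k (List.mem_cons_self ..)
    have hks := fun x hx => h x (List.mem_cons_of_mem _ hx)
    simp only [List.count_cons, List.map_cons, List.sum_cons, Nat.cast_add]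
    rw [PySem.List.sum_map_add_int]
    rw [ih hks]
    have hsnd : ((PySem.List.pyRange 0 40 1).map
        (fun r => ((if (k == (r, pv r)) = true then (1 : Nat) else 0 : Nat) : Int))).sum
        = if k.2 = pv k.1 then 1 else 0 := by
      have : ∀ r : Int, ((if (k == (r, pv r)) = true then (1 : Nat) else 0 : Nat) : Int)
          = (if (r, pv r) = k then (1 : Int) else 0) := by
        intro r
        by_cases hrk : (r, pv r) = k
        · simp [hrk]
        · have hbeq : (k == (r, pv r)) = false := by
            simp only [beq_eq_false_iff_ne, ne_eq]
            exact fun h => hrk h.symm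
          simp [hbeq, hrk]
      simp only [this]
      exact range_ite_sum pv k hk.1 hk.2
    rw [hsnd]
    ring

-- B's bucket score equals the reference score (for any pattern whose length divides 40)
theorem bucket_eq (p : List Int) (answers : List Int) (hdvd : (p.length : Int) ∣ 40)
    (hpos : 0 < (p.length : Int)) :
    bucketScore (histIndex answers) p = refScore p answers := by
  unfold bucketScore histIndex refScore
  rw [← List.foldl_map (f := fun ia : Int × Int => (PySem.Int.mod ia.1 40, ia.2))
        (g := fun (d : PySem.Dict (Int × Int) Int) x => d.modify x 0 (· + 1))]
  have hget : ∀ v : Int × Int,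
      (List.foldl (fun (d : PySem.Dict (Int × Int) Int) x => d.modify x 0 (· + 1))
        PySem.Dict.empty
        ((PySem.List.enumerate answers 0).map (fun ia => (PySem.Int.mod ia.1 40, ia.2)))).getD v 0
      = (((PySem.List.enumerate answers 0).map
            (fun ia => (PySem.Int.mod ia.1 40, ia.2))).count v : Int) := by
    intro v
    rw [PySem.Dict.getD_foldl_modify_add_one]
    rw [PySem.Dict.getD_empty]
    ring
  simp only [hget]
  rw [count_sum_eq (fun r => PySem.List.pyGetD p (PySem.Int.mod r (p.length : Int)) 0)
        ((PySem.List.enumerate answers 0).map (fun ia => (PySem.Int.mod ia.1 40, ia.2)))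
        (by
          intro k hk
          simp only [List.mem_map] at hk
          obtain ⟨ia, _, rfl⟩ := hk
          exact ⟨PySem.Int.mod_nonneg _ (by norm_num), PySem.Int.mod_lt _ (by norm_num)⟩)]
  rw [List.map_map]
  apply congrArg List.sum
  apply List.map_congr_left
  intro ia hia
  have hmm : PySem.Int.mod (PySem.Int.mod ia.1 40) (p.length : Int) = PySem.Int.mod ia.1 (p.length : Int) := by
    rw [PySem.Int.mod_eq_emod_of_pos (by norm_num : (0:Int) < 40),
        PySem.Int.mod_eq_emod_of_pos hpos, PySem.Int.mod_eq_emod_of_pos hpos]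
    exact Int.emod_emod_of_dvd ia.1 hdvd
  simp only [Function.comp, hmm]

-- Python's max of a 3-element list is the usual binary max
theorem max3_eq (a b c : Int) :
    (PySem.List.max? [a, b, c] id).getD 0 = max a (max b c) := by
  simp only [PySem.List.max?, List.foldl, id]
  split_ifs <;> simp <;> split_ifs <;> simp <;> omega

-- ===== VERDICT (by name: the statement is the Claim_ definition above) =====
theorem solution_spec : Claim_equal_solution := by
  intro answers _
  unfold Spec_solution solution solution_alt
  simp only [List.map, triple_eq answers,
    bucket_eq [1, 2, 3, 4, 5] answers (by norm_num) (by norm_num),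
    bucket_eq [2, 1, 2, 3, 2, 4, 2, 5] answers (by norm_num) (by norm_num),
    bucket_eq [3, 3, 1, 1, 2, 2, 4, 4, 5, 5] answers (by norm_num) (by norm_num),
    max3_eq]
  norm_num [List.filterMap_cons, PySem.List.pyGetD_ofNat', PySem.List.pyGet?, PySem.List.pyIdx?]
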